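-- pv_equiv track=rewrite | github.com/PaoloMassignan/kiri | kiri/src/indexer/chunker.py | _find_prefix_start
-- ===== SOURCE A (Python) =====
-- def _find_prefix_start(lines: list[str], node_start: int) -> int:
--     """Walk backwards from node_start to include decorators and blank lines."""
--     i = node_start - 1
--     while i >= 0:
--         stripped = lines[i].strip()
--         if stripped.startswith("@") or stripped.startswith("#"):
--             i -= 1
--         else:
--             break
--     return max(0, i + 1)
-- ===== SOURCE B (Python) =====
-- def _find_prefix_start(lines: list[str], node_start: int) -> int:
--     """Forward single pass: remember the last line before node_start that is
--     not a decorator/comment; the prefix starts right after it."""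
--     last_boundary = -1
--     for i in range(node_start):
--         stripped = lines[i].strip()
--         if not (stripped.startswith("@") or stripped.startswith("#")):
--             last_boundary = i
--     return last_boundary + 1
-- ===== Notes on version B (the rewrite author's own statement) =====
-- stated objective: alternative
-- what changed: Replaces the backward while-loop with early break by a forward single pass over range(node_start) that keeps a last-boundary accumulator and returns last_boundary + 1.
-- outside the precondition, e.g. on _find_prefix_start(['x'], 2): A raises IndexError, B raises IndexError
import Mathlib
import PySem

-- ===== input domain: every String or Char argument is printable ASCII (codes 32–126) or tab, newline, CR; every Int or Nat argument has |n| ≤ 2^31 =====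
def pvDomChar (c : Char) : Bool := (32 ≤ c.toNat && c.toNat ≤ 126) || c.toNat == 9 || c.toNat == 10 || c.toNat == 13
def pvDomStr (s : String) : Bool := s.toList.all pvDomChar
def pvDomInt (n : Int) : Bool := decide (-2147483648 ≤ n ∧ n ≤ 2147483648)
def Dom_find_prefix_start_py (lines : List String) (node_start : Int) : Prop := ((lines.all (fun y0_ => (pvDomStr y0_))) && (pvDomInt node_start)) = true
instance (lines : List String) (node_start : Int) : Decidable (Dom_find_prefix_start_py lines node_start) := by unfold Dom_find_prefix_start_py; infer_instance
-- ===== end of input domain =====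

-- B replaces A's backward cursor with early break by a forward single pass
-- keeping a last-boundary accumulator (alternative decomposition, same cost).


-- ===== PORT A =====
-- the while-loop: walk i backwards while lines[i] strips to a '@'/'#' line
def find_prefix_start_go (lines : List String) (i : Int) : Int :=
  if 0 ≤ i then
    match PySem.List.pyGet? lines i with
    | none => 0  -- IndexError in Python; excluded by Pre_
    | some line =>
      let stripped := PySem.Str.strip line
      if PySem.Str.startswith stripped "@" || PySem.Str.startswith stripped "#" then
        find_prefix_start_go lines (i - 1)
      else max 0 (i + 1)
  else max 0 (i + 1)
termination_by (i + 1).toNat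
decreasing_by omega

def find_prefix_start_py (lines : List String) (node_start : Int) : Int :=
  find_prefix_start_go lines (node_start - 1)

-- ===== PORT B =====
def find_prefix_start_py_alt (lines : List String) (node_start : Int) : Int :=
  let last_boundary :=
    (PySem.List.pyRange 0 node_start 1).foldl
      (fun lb i =>
        match PySem.List.pyGet? lines i with
        | none => lb  -- IndexError in Python; excluded by Pre_
        | some line =>
          let stripped := PySem.Str.strip line
          if !(PySem.Str.startswith stripped "@" || PySem.Str.startswith stripped "#") then i
          else lb)
      (-1)
  last_boundary + 1

-- ===== PRECONDITION & SPEC =====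
-- excludes exactly node_start > len(lines), where Python A (and B) raise IndexError
def Pre_find_prefix_start_py (lines : List String) (node_start : Int) : Prop :=
  node_start ≤ (lines.length : Int)
instance (lines : List String) (node_start : Int) : Decidable (Pre_find_prefix_start_py lines node_start) := by unfold Pre_find_prefix_start_py; infer_instance

def pvWitness_find_prefix_start_py : List String × Int := (["x = 1", "@deco", "# c"], 3)

def Spec_find_prefix_start_py (lines : List String) (node_start : Int) (out : Int) : Prop := out = find_prefix_start_py_alt lines node_start
instance (lines : List String) (node_start : Int) (out : Int) : Decidable (Spec_find_prefix_start_py lines node_start out) := by unfold Spec_find_prefix_start_py; infer_instance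

-- ===== CLAIM (what is proved, stated in full; the proofs are below) =====
def Claim_equal_find_prefix_start_py : Prop := ∀ (lines : List String) (node_start : Int), Dom_find_prefix_start_py lines node_start → Pre_find_prefix_start_py lines node_start → Spec_find_prefix_start_py lines node_start (find_prefix_start_py lines node_start)

-- ===== LEMMAS AND PROOFS =====

-- the accumulator step of B's fold, named for the proofs
def fpsStep (lines : List String) (lb i : Int) : Int :=
  match PySem.List.pyGet? lines i with
  | none => lb
  | some line =>
    let stripped := PySem.Str.strip line
    if !(PySem.Str.startswith stripped "@" || PySem.Str.startswith stripped "#") then i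
    else lb

theorem alt_eq_fold (lines : List String) (node_start : Int) :
    find_prefix_start_py_alt lines node_start =
      (PySem.List.pyRange 0 node_start 1).foldl (fpsStep lines) (-1) + 1 := rfl

theorem key (lines : List String) (m : Nat) (h : m ≤ lines.length) :
    find_prefix_start_go lines ((m : Int) - 1) =
      (PySem.List.pyRange 0 (m : Int) 1).foldl (fpsStep lines) (-1) + 1 := by
  induction m with
  | zero =>
      rw [find_prefix_start_go, PySem.List.pyRange_one_eq_nil (by omega)]
      norm_num
  | succ n ih =>
      have hn : n < lines.length := by omega
      have hget : PySem.List.pyGet? lines (n : Int) = some lines[n] :=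
        PySem.List.pyGet?_ofNat lines n hn
      have h1 : (((n + 1 : Nat)) : Int) - 1 = (n : Int) := by push_cast; ring
      have h2 : (((n + 1 : Nat)) : Int) = (n : Int) + 1 := by push_cast; ring
      rw [h1, h2, find_prefix_start_go,
          PySem.List.pyRange_one_succ_right (by omega), List.foldl_append]
      simp only [List.foldl_cons, List.foldl_nil]
      rw [if_pos (by omega : (0:Int) ≤ (n : Int)), hget]
      unfold fpsStep
      rw [hget]
      by_cases hd : (PySem.Str.startswith (PySem.Str.strip lines[n]) "@" ||
                     PySem.Str.startswith (PySem.Str.strip lines[n]) "#") = true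
      · simp only [hd, if_true, Bool.not_true, Bool.false_eq_true, if_false]
        exact ih (by omega)
      · simp only [Bool.not_eq_true] at hd
        simp only [hd, Bool.false_eq_true, if_false, Bool.not_false, if_true]
        omega

-- ===== VERDICT (by name: the statement is the Claim_ definition above) =====
theorem find_prefix_start_py_spec : Claim_equal_find_prefix_start_py := by
  intro lines node_start _ hpre
  unfold Spec_find_prefix_start_py find_prefix_start_py
  rw [alt_eq_fold]
  by_cases hns : 0 ≤ node_start
  · have hm : node_start = ((node_start.toNat : Nat) : Int) := by omega
    rw [hm]
    exact key lines node_start.toNat (by unfold Pre_find_prefix_start_py at hpre; omega)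
  · rw [find_prefix_start_go, if_neg (by omega),
        PySem.List.pyRange_one_eq_nil (by omega)]
    simp only [List.foldl_nil]
    omega
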